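-- pv_equiv track=rewrite | github.com/pypi-data/pypi-mirror-325 | packages/dreamml/dreamml-3.5.4.1.tar.gz/dreamml-3.5.4.1/dreamml/utils/get_n_iterartions.py | get_n_iterations
-- ===== SOURCE A (Python) =====
-- def get_n_iterations(shape: int) -> int:
--     """
--     Функция для выбора количества интераций оптимизатора
--     в зависимости от количества наблюдений в dev выборке.
--
--     Parameters
--         ----------
--         shape: int
--             Количество наблюдений в dev выборке.
--
--         Returns
--         -------
--         iterations: int
--             Количество итераций оптимизатора.
--     """
--
--     dict_of_shapes_and_iterations = {
--         0: 300,
--         10000: 200,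
--         25000: 150,
--         50000: 100,
--         75000: 50,
--         100000: 20,
--         200000: 10,
--     }
--
--     iterations = 0
--
--     for key, value in dict_of_shapes_and_iterations.items():
--         if shape > key:
--             iterations = value
--
--     return iterations
-- ===== SOURCE B (Python) =====
-- def get_n_iterations(shape: int) -> int:
--     keys = [0, 10000, 25000, 50000, 75000, 100000, 200000]
--     vals = [300, 200, 150, 100, 50, 20, 10]
--     # bisect_left: number of keys strictly less than shape
--     lo, hi = 0, len(keys)
--     while lo < hi:
--         mid = (lo + hi) // 2
--         if keys[mid] < shape:
--             lo = mid + 1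
--         else:
--             hi = mid
--     return 0 if lo == 0 else vals[lo - 1]
-- ===== Notes on version B (the rewrite author's own statement) =====
-- stated objective: alternative
-- what changed: replaces the linear scan over the threshold dict (last matching value wins) with a hand-written bisect_left binary search over sorted threshold keys and one indexed lookup into a parallel value list
import Mathlib
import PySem

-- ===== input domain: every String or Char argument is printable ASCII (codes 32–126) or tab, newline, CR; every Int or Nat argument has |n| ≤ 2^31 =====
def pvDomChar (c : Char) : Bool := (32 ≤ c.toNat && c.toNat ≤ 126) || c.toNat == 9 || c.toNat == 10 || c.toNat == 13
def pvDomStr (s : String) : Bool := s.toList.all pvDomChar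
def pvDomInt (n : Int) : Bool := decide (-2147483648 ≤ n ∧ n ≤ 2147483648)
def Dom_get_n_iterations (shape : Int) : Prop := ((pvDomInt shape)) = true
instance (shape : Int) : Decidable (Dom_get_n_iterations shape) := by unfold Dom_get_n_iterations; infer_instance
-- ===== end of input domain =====

-- B replaces A's linear last-match scan over the threshold dict with a bisect_left
-- binary search plus one indexed lookup (objective: alternative algorithm).

-- ===== PORT A =====
-- the dict literal, as an insertion-ordered association list
def pvShapesDict : List (Int × Int) :=
  [(0, 300), (10000, 200), (25000, 150), (50000, 100), (75000, 50), (100000, 20), (200000, 10)]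

-- the for-loop over .items(): last key with shape > key wins, accumulator starts at 0
def get_n_iterations (shape : Int) : Int :=
  pvShapesDict.foldl (fun iterations kv => if shape > kv.1 then kv.2 else iterations) 0

-- ===== PORT B =====
def pvKeys : List Int := [0, 10000, 25000, 50000, 75000, 100000, 200000]
def pvVals : List Int := [300, 200, 150, 100, 50, 20, 10]

-- the while lo < hi loop of hand-written bisect_left; fuel bounds the iterations
def pvBisectLoop (shape : Int) : Nat → Nat → Nat → Nat
  | 0, lo, _ => lo
  | fuel + 1, lo, hi =>
    if lo < hi then
      let mid := (lo + hi) / 2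
      if pvKeys.getD mid 0 < shape then pvBisectLoop shape fuel (mid + 1) hi
      else pvBisectLoop shape fuel lo mid
    else lo

def get_n_iterations_alt (shape : Int) : Int :=
  let lo := pvBisectLoop shape pvKeys.length 0 pvKeys.length
  if lo == 0 then 0 else pvVals.getD (lo - 1) 0

-- ===== PRECONDITION & SPEC =====
def Spec_get_n_iterations (shape : Int) (out : Int) : Prop := out = get_n_iterations_alt shape
instance (shape : Int) (out : Int) : Decidable (Spec_get_n_iterations shape out) := by unfold Spec_get_n_iterations; infer_instance

-- ===== CLAIM (what is proved, stated in full; the proofs are below) =====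
def Claim_equal_get_n_iterations : Prop := ∀ (shape : Int), Dom_get_n_iterations shape → Spec_get_n_iterations shape (get_n_iterations shape)

-- ===== LEMMAS AND PROOFS =====

-- ===== VERDICT (by name: the statement is the Claim_ definition above) =====
set_option maxHeartbeats 1000000 in
theorem get_n_iterations_spec : Claim_equal_get_n_iterations := by
  intro shape _
  unfold Spec_get_n_iterations
  by_cases c6 : (200000:Int) < shape
  · have f0 : (0:Int) < shape := by omega
    have f1 : (10000:Int) < shape := by omega
    have f2 : (25000:Int) < shape := by omega
    have f3 : (50000:Int) < shape := by omega
    have f4 : (75000:Int) < shape := by omega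
    have f5 : (100000:Int) < shape := by omega
    have f6 : (200000:Int) < shape := by omega
    norm_num [get_n_iterations, get_n_iterations_alt, pvBisectLoop, pvShapesDict, pvKeys, pvVals, f0, f1, f2, f3, f4, f5, f6]
  by_cases c5 : (100000:Int) < shape
  · have f0 : (0:Int) < shape := by omega
    have f1 : (10000:Int) < shape := by omega
    have f2 : (25000:Int) < shape := by omega
    have f3 : (50000:Int) < shape := by omega
    have f4 : (75000:Int) < shape := by omega
    have f5 : (100000:Int) < shape := by omega
    have f6 : ¬ (200000:Int) < shape := by omega
    norm_num [get_n_iterations, get_n_iterations_alt, pvBisectLoop, pvShapesDict, pvKeys, pvVals, f0, f1, f2, f3, f4, f5, f6]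
  by_cases c4 : (75000:Int) < shape
  · have f0 : (0:Int) < shape := by omega
    have f1 : (10000:Int) < shape := by omega
    have f2 : (25000:Int) < shape := by omega
    have f3 : (50000:Int) < shape := by omega
    have f4 : (75000:Int) < shape := by omega
    have f5 : ¬ (100000:Int) < shape := by omega
    have f6 : ¬ (200000:Int) < shape := by omega
    norm_num [get_n_iterations, get_n_iterations_alt, pvBisectLoop, pvShapesDict, pvKeys, pvVals, f0, f1, f2, f3, f4, f5, f6]
  by_cases c3 : (50000:Int) < shape
  · have f0 : (0:Int) < shape := by omega
    have f1 : (10000:Int) < shape := by omega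
    have f2 : (25000:Int) < shape := by omega
    have f3 : (50000:Int) < shape := by omega
    have f4 : ¬ (75000:Int) < shape := by omega
    have f5 : ¬ (100000:Int) < shape := by omega
    have f6 : ¬ (200000:Int) < shape := by omega
    norm_num [get_n_iterations, get_n_iterations_alt, pvBisectLoop, pvShapesDict, pvKeys, pvVals, f0, f1, f2, f3, f4, f5, f6]
  by_cases c2 : (25000:Int) < shape
  · have f0 : (0:Int) < shape := by omega
    have f1 : (10000:Int) < shape := by omega
    have f2 : (25000:Int) < shape := by omega
    have f3 : ¬ (50000:Int) < shape := by omega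
    have f4 : ¬ (75000:Int) < shape := by omega
    have f5 : ¬ (100000:Int) < shape := by omega
    have f6 : ¬ (200000:Int) < shape := by omega
    norm_num [get_n_iterations, get_n_iterations_alt, pvBisectLoop, pvShapesDict, pvKeys, pvVals, f0, f1, f2, f3, f4, f5, f6]
  by_cases c1 : (10000:Int) < shape
  · have f0 : (0:Int) < shape := by omega
    have f1 : (10000:Int) < shape := by omega
    have f2 : ¬ (25000:Int) < shape := by omega
    have f3 : ¬ (50000:Int) < shape := by omega
    have f4 : ¬ (75000:Int) < shape := by omega
    have f5 : ¬ (100000:Int) < shape := by omega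
    have f6 : ¬ (200000:Int) < shape := by omega
    norm_num [get_n_iterations, get_n_iterations_alt, pvBisectLoop, pvShapesDict, pvKeys, pvVals, f0, f1, f2, f3, f4, f5, f6]
  by_cases c0 : (0:Int) < shape
  · have f0 : (0:Int) < shape := by omega
    have f1 : ¬ (10000:Int) < shape := by omega
    have f2 : ¬ (25000:Int) < shape := by omega
    have f3 : ¬ (50000:Int) < shape := by omega
    have f4 : ¬ (75000:Int) < shape := by omega
    have f5 : ¬ (100000:Int) < shape := by omega
    have f6 : ¬ (200000:Int) < shape := by omega
    norm_num [get_n_iterations, get_n_iterations_alt, pvBisectLoop, pvShapesDict, pvKeys, pvVals, f0, f1, f2, f3, f4, f5, f6]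
  · have f0 : ¬ (0:Int) < shape := by omega
    have f1 : ¬ (10000:Int) < shape := by omega
    have f2 : ¬ (25000:Int) < shape := by omega
    have f3 : ¬ (50000:Int) < shape := by omega
    have f4 : ¬ (75000:Int) < shape := by omega
    have f5 : ¬ (100000:Int) < shape := by omega
    have f6 : ¬ (200000:Int) < shape := by omega
    norm_num [get_n_iterations, get_n_iterations_alt, pvBisectLoop, pvShapesDict, pvKeys, pvVals, f0, f1, f2, f3, f4, f5, f6]
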